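-- pv_equiv track=rewrite | github.com/cal-badminton/match_scheduler | graph_maker.py | group_main_matches_by_round
-- ===== SOURCE A (Python) =====
-- def group_main_matches_by_round(main_matches):
--   main_matches_by_round = [main_matches[-1:]]
--   num_matches_in_round, num_grouped_matches = 2, 1
--
--   while num_grouped_matches < len(main_matches):
--     matches_in_round = main_matches[-(num_matches_in_round + num_grouped_matches):-num_grouped_matches]
--     main_matches_by_round.insert(0, matches_in_round)
--     num_grouped_matches += num_matches_in_round
--     num_matches_in_round *= 2
--
--   return main_matches_by_round
-- ===== SOURCE B (Python) =====
-- def group_main_matches_by_round(main_matches):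
--     n = len(main_matches)
--     sizes = []
--     size, total = 1, 0
--     while total + size < n:
--         sizes.append(size)
--         total += size
--         size *= 2
--     result = []
--     start = 0
--     for sz in [n - total] + sizes[::-1]:
--         result.append(main_matches[start:start + sz])
--         start += sz
--     return result
-- ===== Notes on version B (the rewrite author's own statement) =====
-- stated objective: simpler
-- what changed: A builds the result back-to-front by repeatedly prepending negative-index slices inside the doubling loop; B first computes the list of round sizes (remainder then reversed doubling sizes) and then makes one plain forward pass cutting consecutive slices with a running start index.
import Mathlib
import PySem

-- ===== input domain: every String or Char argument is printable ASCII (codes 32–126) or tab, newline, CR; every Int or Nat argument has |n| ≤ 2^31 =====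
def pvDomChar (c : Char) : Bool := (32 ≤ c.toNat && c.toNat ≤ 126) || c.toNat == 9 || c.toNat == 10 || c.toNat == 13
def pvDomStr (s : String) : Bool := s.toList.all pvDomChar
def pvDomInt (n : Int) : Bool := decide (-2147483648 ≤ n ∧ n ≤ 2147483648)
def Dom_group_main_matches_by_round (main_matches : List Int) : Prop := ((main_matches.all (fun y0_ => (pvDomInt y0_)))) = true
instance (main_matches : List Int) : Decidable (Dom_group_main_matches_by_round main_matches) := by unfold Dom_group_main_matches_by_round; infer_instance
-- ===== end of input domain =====

-- B replaces A's backward doubling loop that prepends negative slices with a plain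
-- forward pass: compute the round sizes first, then cut consecutive forward slices
-- (objective: simpler/alternative decomposition, same cost).

-- ===== PORT A =====
-- A's while loop; fuel (length+1) strictly bounds the iteration count (the grouped
-- counter grows by ≥ 2 each pass while it is below the length).
def pvALoop (l : List Int) (n : Nat) : Nat → Nat → Nat → List (List Int) → List (List Int)
  | 0, _, _, acc => acc
  | f + 1, k, g, acc =>
    if g < n then
      pvALoop l n f (k * 2) (g + k)
        (PySem.List.slice l (some (-((k + g : Nat) : Int))) (some (-((g : Nat) : Int))) :: acc)
    else acc

def group_main_matches_by_round (main_matches : List Int) : List (List Int) :=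
  pvALoop main_matches main_matches.length (main_matches.length + 1) 2 1
    [PySem.List.slice main_matches (some (-1)) none]

-- ===== PORT B =====
-- B's first while loop: collect the doubling round sizes back-to-front and their total.
def pvSizesLoop (n : Nat) : Nat → Nat → Nat → List Nat × Nat
  | 0, _, total => ([], total)
  | f + 1, size, total =>
    if total + size < n then
      let r := pvSizesLoop n f (size * 2) (total + size)
      (size :: r.1, r.2)
    else ([], total)

-- B's second loop: forward slicing pass over the size list with a running start index.
def pvFwd (l : List Int) : List Nat → Nat → List (List Int)
  | [], _ => []
  | s :: rest, start =>
    PySem.List.slice l (some ((start : Nat) : Int)) (some ((start + s : Nat) : Int))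
      :: pvFwd l rest (start + s)

def group_main_matches_by_round_alt (main_matches : List Int) : List (List Int) :=
  let n := main_matches.length
  let r := pvSizesLoop n (n + 1) 1 0
  pvFwd main_matches ((n - r.2) :: r.1.reverse) 0

-- ===== PRECONDITION & SPEC =====
def Spec_group_main_matches_by_round (main_matches : List Int) (out : List (List Int)) : Prop := out = group_main_matches_by_round_alt main_matches
instance (main_matches : List Int) (out : List (List Int)) : Decidable (Spec_group_main_matches_by_round main_matches out) := by unfold Spec_group_main_matches_by_round; infer_instance

-- ===== CLAIM (what is proved, stated in full; the proofs are below) =====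
def Claim_equal_group_main_matches_by_round : Prop := ∀ (main_matches : List Int), Dom_group_main_matches_by_round main_matches → Spec_group_main_matches_by_round main_matches (group_main_matches_by_round main_matches)

-- ===== LEMMAS AND PROOFS =====

-- normalisation of a doubly-negative Python slice to drop/take
theorem pv_slice_neg_neg (l : List Int) (a b : Nat) (ha : 0 < a) (hb : 0 < b) :
    PySem.List.slice l (some (-(a : Int))) (some (-(b : Int)))
      = (l.drop (l.length - a)).take ((l.length - b) - (l.length - a)) := by
  simp [PySem.List.slice, PySem.List.clampIdx_neg_natCast, ha, hb]

-- drop/take chunks with arithmetically equal bounds coincide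
theorem pv_dt_congr (l : List Int) (a b c d : Nat) (h1 : a = c) (h2 : b = d) :
    (l.drop a).take b = (l.drop c).take d := by rw [h1, h2]

-- invariant of B's size loop: final total = initial total + sum of collected sizes,
-- and the total either stays put or remains below n
theorem pvSizesLoop_spec (n : Nat) : ∀ (f s t : Nat),
    (pvSizesLoop n f s t).2 = t + (pvSizesLoop n f s t).1.sum ∧
      ((pvSizesLoop n f s t).2 = t ∨ (pvSizesLoop n f s t).2 < n) := by
  intro f
  induction f with
  | zero => intro s t; simp [pvSizesLoop]
  | succ f ih =>
    intro s t
    by_cases h : t + s < n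
    · have := ih (s * 2) (t + s)
      simp only [pvSizesLoop, if_pos h, List.sum_cons]
      refine ⟨by omega, Or.inr ?_⟩
      rcases this.2 with h2 | h2 <;> omega
    · simp [pvSizesLoop, if_neg h]

-- appending one size at the end of the forward pass appends one slice
theorem pvFwd_append (l : List Int) : ∀ (ss : List Nat) (s start : Nat),
    pvFwd l (ss ++ [s]) start
      = pvFwd l ss start ++
          [PySem.List.slice l (some ((start + ss.sum : Nat) : Int))
            (some ((start + ss.sum + s : Nat) : Int))] := by
  intro ss
  induction ss with
  | nil => intro s start; simp [pvFwd]
  | cons a tl ih =>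
    intro s start
    simp only [List.cons_append, pvFwd, List.sum_cons]
    rw [ih]
    have e1 : start + a + tl.sum = start + (a + tl.sum) := by omega
    rw [e1]

-- main correspondence: A's loop at state (g+1, g) produces exactly B's forward
-- split of the unprocessed prefix, prepended to the accumulator
theorem pvMain (l : List Int) : ∀ (f1 f2 g : Nat), 1 ≤ g →
    l.length - g ≤ f1 → l.length - g ≤ f2 → ∀ (acc : List (List Int)),
    pvALoop l l.length f1 (g + 1) g acc
      = (if g < l.length then
          pvFwd l ((l.length - (pvSizesLoop l.length f2 (g + 1) g).2)
                    :: (pvSizesLoop l.length f2 (g + 1) g).1.reverse) 0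
         else []) ++ acc := by
  intro f1
  induction f1 with
  | zero =>
    intro f2 g hg h1 h2 acc
    have hng : ¬ g < l.length := by omega
    simp [pvALoop, if_neg hng]
  | succ f ih =>
    intro f2 g hg h1 h2 acc
    by_cases hgn : g < l.length
    · -- A takes one step
      obtain ⟨f2', rfl⟩ : ∃ f2', f2 = f2' + 1 := ⟨f2 - 1, by omega⟩
      simp only [pvALoop, if_pos hgn]
      have hk2 : (g + 1) * 2 = (2 * g + 1) + 1 := by ring
      have hgk : g + (g + 1) = 2 * g + 1 := by ring
      rw [hk2, hgk]
      rw [ih f2' (2 * g + 1) (by omega) (by omega) (by omega)]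
      by_cases hin : 2 * g + 1 < l.length
      · -- inner case: one more round exists
        rw [if_pos hin]
        have hcond : g + (g + 1) < l.length := by omega
        simp only [pvSizesLoop, if_pos hcond]
        rw [hk2, hgk]
        set r := pvSizesLoop l.length f2' (2 * g + 1 + 1) (2 * g + 1) with hr
        have hspec := pvSizesLoop_spec l.length f2' (2 * g + 1 + 1) (2 * g + 1)
        rw [← hr] at hspec
        have hT1 : r.2 = (2 * g + 1) + r.1.sum := hspec.1
        have hTn : r.2 < l.length := by rcases hspec.2 with h | h <;> omega
        rw [List.reverse_cons, ← List.cons_append, pvFwd_append, List.append_assoc]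
        congr 1
        rw [List.singleton_append]
        congr 1
        rw [pv_slice_neg_neg l (g + 1 + g) g (by omega) (by omega)]
        rw [PySem.List.slice_natCast]
        simp only [List.sum_cons, List.sum_reverse, Nat.zero_add]
        exact pv_dt_congr l _ _ _ _ (by omega) (by omega)
      · -- last round: the remaining prefix is a single chunk
        rw [if_neg hin]
        have hnin : ¬ g + (g + 1) < l.length := by omega
        simp only [pvSizesLoop, if_neg hnin, List.reverse_nil]
        simp only [pvFwd, List.nil_append]
        congr 1
        rw [pv_slice_neg_neg l (g + 1 + g) g (by omega) (by omega)]
        rw [PySem.List.slice_natCast]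
        exact pv_dt_congr l _ _ _ _ (by omega) (by omega)
    · simp [pvALoop, if_neg hgn]

-- a one-element tail slice: the last element as the final chunk
theorem pv_take_one_drop (l : List Int) :
    (l.drop (l.length - 1)).take 1 = l.drop (l.length - 1) := by
  apply List.take_of_length_le
  simp
  omega

-- ===== VERDICT (by name: the statement is the Claim_ definition above) =====
theorem group_main_matches_by_round_spec : Claim_equal_group_main_matches_by_round := by
  intro l _
  unfold Spec_group_main_matches_by_round group_main_matches_by_round group_main_matches_by_round_alt
  rcases l with _ | ⟨x, tl⟩
  · decide
  · rcases tl with _ | ⟨y, tl'⟩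
    · norm_num [pvALoop, pvSizesLoop, pvFwd, PySem.List.slice_from_neg_one, PySem.List.slice]
    · set l : List Int := x :: y :: tl' with hl
      have hn2 : 2 ≤ l.length := by simp [hl]
      have h1 : pvALoop l l.length (l.length + 1) 2 1
          [PySem.List.slice l (some (-1)) none]
          = pvFwd l ((l.length - (pvSizesLoop l.length l.length 2 1).2)
                      :: (pvSizesLoop l.length l.length 2 1).1.reverse) 0
              ++ [PySem.List.slice l (some (-1)) none] := by
        have := pvMain l (l.length + 1) l.length 1 (by omega) (by omega) (by omega)
          [PySem.List.slice l (some (-1)) none]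
        rw [this, if_pos (by omega)]
      rw [h1]
      have hcond : (0 : Nat) + 1 < l.length := by omega
      simp only [pvSizesLoop, if_pos hcond]
      set r := pvSizesLoop l.length l.length (1 * 2) (0 + 1) with hr
      have hspec := pvSizesLoop_spec l.length l.length (1 * 2) (0 + 1)
      rw [← hr] at hspec
      have hT1 : r.2 = 1 + r.1.sum := by have := hspec.1; omega
      have hTn : r.2 < l.length := by rcases hspec.2 with h | h <;> omega
      rw [List.reverse_cons, ← List.cons_append, pvFwd_append]
      congr 1
      rw [PySem.List.slice_natCast, PySem.List.slice_from_neg_one, ← pv_take_one_drop]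
      simp only [List.sum_cons, List.sum_reverse, Nat.zero_add]
      congr 1
      exact pv_dt_congr l _ _ _ _ (by omega) (by omega)
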